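-- pv_equiv track=rewrite | github.com/hamzajg/agentcraft | agents/supervisor/agent.py | decide_agent_assignment
-- ===== SOURCE A (Python) =====
-- def decide_agent_assignment(iteration: dict, architecture: str) -> str:
--     """
--     Decide which agent should handle an iteration based on architecture style.
--
--     Args:
--         iteration: Iteration dict with name, description, etc.
--         architecture: "monolith" or "microservice"
--
--     Returns: Agent name ("backend_dev", "config_agent", etc.)
--     """
--     iteration_name = iteration.get("name", "").lower()
--     description = iteration.get("description", "").lower()
--
--     # Architecture-specific agent assignments
--     if architecture == "microservice":
--         # For microservices, prefer specialized agents for service-related work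
--         if any(keyword in iteration_name + description for keyword in
--               ["api", "gateway", "service", "microservice", "endpoint"]):
--             return "backend_dev"  # Could be specialized service agent
--
--         if any(keyword in iteration_name + description for keyword in
--               ["docker", "compose", "kubernetes", "deployment", "orchestration"]):
--             return "config_agent"
--
--         if any(keyword in iteration_name + description for keyword in
--               ["monitoring", "logging", "tracing", "observability"]):
--             return "config_agent"
--
--     else:  # monolith
--         # For monoliths, standard agent assignments
--         if any(keyword in iteration_name + description for keyword in
--               ["database", "model", "entity", "schema"]):
--             return "backend_dev"
--
--         if any(keyword in iteration_name + description for keyword in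
--               ["config", "deployment", "infrastructure"]):
--             return "config_agent"
--
--     # Default assignment
--     return iteration.get("agent", "backend_dev")
-- ===== SOURCE B (Python) =====
-- def _kw_table(groups):
--     # flat keyword -> (rule priority, agent) index
--     return {kw: (i, agent) for i, (kws, agent) in enumerate(groups) for kw in kws}
--
--
-- _MICRO = _kw_table([
--     (("api", "gateway", "service", "microservice", "endpoint"), "backend_dev"),
--     (("docker", "compose", "kubernetes", "deployment", "orchestration"), "config_agent"),
--     (("monitoring", "logging", "tracing", "observability"), "config_agent"),
-- ])
--
-- _MONO = _kw_table([
--     (("database", "model", "entity", "schema"), "backend_dev"),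
--     (("config", "deployment", "infrastructure"), "config_agent"),
-- ])
--
--
-- def decide_agent_assignment(iteration: dict, architecture: str) -> str:
--     combined = iteration.get("name", "").lower() + iteration.get("description", "").lower()
--     table = _MICRO if architecture == "microservice" else _MONO
--     best = None
--     for kw, (prio, agent) in table.items():
--         if kw in combined and (best is None or prio < best[0]):
--             best = (prio, agent)
--     return best[1] if best is not None else iteration.get("agent", "backend_dev")
-- ===== Notes on version B (the rewrite author's own statement) =====
-- stated objective: alternative
-- what changed: Replaces the per-architecture if-chains with early returns by a flat keyword->(priority, agent) index scanned in one pass keeping the minimum-priority match, returning that agent (or the default) at the end.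
import Mathlib
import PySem

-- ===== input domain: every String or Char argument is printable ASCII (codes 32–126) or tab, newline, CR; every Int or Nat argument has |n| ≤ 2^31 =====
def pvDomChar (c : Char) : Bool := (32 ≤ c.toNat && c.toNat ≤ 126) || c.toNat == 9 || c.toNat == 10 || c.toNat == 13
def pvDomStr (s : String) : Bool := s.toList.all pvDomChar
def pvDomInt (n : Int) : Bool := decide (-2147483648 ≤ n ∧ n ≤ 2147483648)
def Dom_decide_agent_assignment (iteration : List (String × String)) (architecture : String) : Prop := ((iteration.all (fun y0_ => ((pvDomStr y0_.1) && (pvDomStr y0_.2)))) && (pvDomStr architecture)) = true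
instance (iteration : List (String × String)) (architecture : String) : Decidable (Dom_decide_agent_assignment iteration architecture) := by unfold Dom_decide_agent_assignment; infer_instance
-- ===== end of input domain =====

-- B replaces the branch chains with a flat keyword->(priority, agent) index scanned once keeping the minimum-priority match (objective: alternative decomposition, same cost).
-- ===== PORT A =====
-- dict.get(k, dflt): first-match association-list lookup
def pvGetD (d : List (String × String)) (k dflt : String) : String :=
  match d.find? (fun p => p.1 == k) with
  | some p => p.2
  | none => dflt

def decide_agent_assignment (iteration : List (String × String)) (architecture : String) : String :=
  let iteration_name := PySem.Chars.lower (pvGetD iteration "name" "").toList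
  let description := PySem.Chars.lower (pvGetD iteration "description" "").toList
  if architecture == "microservice" then
    if (["api", "gateway", "service", "microservice", "endpoint"] : List String).any
        (fun kw => PySem.Chars.isIn kw.toList (iteration_name ++ description)) then "backend_dev"
    else if (["docker", "compose", "kubernetes", "deployment", "orchestration"] : List String).any
        (fun kw => PySem.Chars.isIn kw.toList (iteration_name ++ description)) then "config_agent"
    else if (["monitoring", "logging", "tracing", "observability"] : List String).any
        (fun kw => PySem.Chars.isIn kw.toList (iteration_name ++ description)) then "config_agent"
    else pvGetD iteration "agent" "backend_dev"
  else
    if (["database", "model", "entity", "schema"] : List String).any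
        (fun kw => PySem.Chars.isIn kw.toList (iteration_name ++ description)) then "backend_dev"
    else if (["config", "deployment", "infrastructure"] : List String).any
        (fun kw => PySem.Chars.isIn kw.toList (iteration_name ++ description)) then "config_agent"
    else pvGetD iteration "agent" "backend_dev"

-- ===== PORT B =====
-- _kw_table: flat keyword -> (rule priority, agent) index built from the rule groups
def pvKwTable : List (List String × String) → Nat → List (String × Nat × String)
  | [], _ => []
  | (kws, agent) :: gs, i => kws.map (fun k => (k, i, agent)) ++ pvKwTable gs (i + 1)

def pvMicroTable : List (String × Nat × String) :=
  pvKwTable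
    [ (["api", "gateway", "service", "microservice", "endpoint"], "backend_dev"),
      (["docker", "compose", "kubernetes", "deployment", "orchestration"], "config_agent"),
      (["monitoring", "logging", "tracing", "observability"], "config_agent") ] 0

def pvMonoTable : List (String × Nat × String) :=
  pvKwTable
    [ (["database", "model", "entity", "schema"], "backend_dev"),
      (["config", "deployment", "infrastructure"], "config_agent") ] 0

-- loop body: keep the minimum-priority matching keyword seen so far
def pvStep (combined : List Char) (best : Option (Nat × String)) (e : String × Nat × String) :
    Option (Nat × String) :=
  if PySem.Chars.isIn e.1.toList combined &&
      (match best with | none => true | some b => decide (e.2.1 < b.1)) then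
    some e.2
  else best

def decide_agent_assignment_alt (iteration : List (String × String)) (architecture : String) : String :=
  let combined := PySem.Chars.lower (pvGetD iteration "name" "").toList
      ++ PySem.Chars.lower (pvGetD iteration "description" "").toList
  let table := if architecture == "microservice" then pvMicroTable else pvMonoTable
  match table.foldl (pvStep combined) none with
  | some b => b.2
  | none => pvGetD iteration "agent" "backend_dev"

-- ===== PRECONDITION & SPEC =====
def Spec_decide_agent_assignment (iteration : List (String × String)) (architecture : String) (out : String) : Prop := out = decide_agent_assignment_alt iteration architecture
instance (iteration : List (String × String)) (architecture : String) (out : String) : Decidable (Spec_decide_agent_assignment iteration architecture out) := by unfold Spec_decide_agent_assignment; infer_instance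

-- ===== CLAIM (what is proved, stated in full; the proofs are below) =====
def Claim_equal_decide_agent_assignment : Prop := ∀ (iteration : List (String × String)) (architecture : String), Dom_decide_agent_assignment iteration architecture → Spec_decide_agent_assignment iteration architecture (decide_agent_assignment iteration architecture)

-- ===== LEMMAS AND PROOFS =====

-- once best holds a priority ≤ every remaining priority, the fold never changes it
theorem pvStep_frozen (c : List Char) (l : List (String × Nat × String)) (p : Nat) (a : String)
    (h : ∀ x ∈ l, p ≤ x.2.1) :
    l.foldl (pvStep c) (some (p, a)) = some (p, a) := by
  induction l with
  | nil => rfl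
  | cons x xs ih =>
    have hx : p ≤ x.2.1 := h x (by simp)
    have : pvStep c (some (p, a)) x = some (p, a) := by
      unfold pvStep
      have : ¬ (x.2.1 < p) := by omega
      simp [this]
    rw [List.foldl_cons, this]
    exact ih (fun y hy => h y (by simp [hy]))

-- on a priority-nondecreasing table, the min-selection fold returns the FIRST match
theorem pvFold_eq_find (c : List Char) (l : List (String × Nat × String))
    (h : l.Pairwise (fun x y => x.2.1 ≤ y.2.1)) :
    l.foldl (pvStep c) none = (l.find? (fun x => PySem.Chars.isIn x.1.toList c)).map (·.2) := by
  induction l with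
  | nil => rfl
  | cons x xs ih =>
    rcases List.pairwise_cons.mp h with ⟨hx, hxs⟩
    by_cases hin : PySem.Chars.isIn x.1.toList c
    · have hstep : pvStep c none x = some x.2 := by unfold pvStep; simp [hin]
      rw [List.foldl_cons, hstep, List.find?_cons_of_pos (by simpa using hin)]
      exact pvStep_frozen c xs x.2.1 x.2.2 (fun y hy => hx y hy)
    · have hstep : pvStep c none x = none := by unfold pvStep; simp [hin]
      rw [List.foldl_cons, hstep, List.find?_cons_of_neg (by simpa using hin)]
      exact ih hxs

-- first match over a one-agent keyword group, peeled off the front of the table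
theorem pvFind_group (c : List Char) (kws : List String) (p : Nat) (a : String)
    (rest : List (String × Nat × String)) :
    (((kws.map (fun k => (k, p, a))) ++ rest).find?
        (fun x => PySem.Chars.isIn x.1.toList c)).map (·.2)
    = if kws.any (fun k => PySem.Chars.isIn k.toList c) then some (p, a)
      else (rest.find? (fun x => PySem.Chars.isIn x.1.toList c)).map (·.2) := by
  induction kws with
  | nil => simp
  | cons k ks ih =>
    by_cases hin : PySem.Chars.isIn k.toList c
    · simp [hin]
    · simpa [List.find?_cons, hin] using ih

-- ===== VERDICT (by name: the statement is the Claim_ definition above) =====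
theorem decide_agent_assignment_spec : Claim_equal_decide_agent_assignment := by
  intro it arch _
  unfold Spec_decide_agent_assignment decide_agent_assignment decide_agent_assignment_alt
  by_cases h : (arch == "microservice") = true
  · simp only [h, if_true]
    rw [pvFold_eq_find _ _ (by unfold pvMicroTable pvKwTable; decide)]
    simp only [pvMicroTable, pvKwTable]
    rw [pvFind_group, pvFind_group, pvFind_group]
    split_ifs <;> simp
  · rw [Bool.not_eq_true] at h
    simp only [h, Bool.false_eq_true, if_false]
    rw [pvFold_eq_find _ _ (by unfold pvMonoTable pvKwTable; decide)]
    simp only [pvMonoTable, pvKwTable]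
    rw [pvFind_group, pvFind_group]
    split_ifs <;> simp
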